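-- pv_equiv track=rewrite | github.com/heavens420/base | algorithm/胡牌问题.py | find_kezi
-- ===== SOURCE A (Python) =====
-- def find_kezi(arr):
--     kezi_lst = []
--     pre_index = 0
--     for i in range(2, len(arr)):
--         if arr[i] == arr[i - 1] and arr[i] == arr[i - 2] and pre_index + 1 != i:
--             kezi_lst.append(i)
--             pre_index = i
--     return kezi_lst
-- ===== SOURCE B (Python) =====
-- def find_kezi(arr):
--     res = []
--     n = len(arr)
--     start = 0
--     while start < n:
--         end = start
--         while end < n and arr[end] == arr[start]:
--             end += 1
--         run_len = end - start
--         for k in range((run_len - 1) // 2):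
--             res.append(start + 2 + 2 * k)
--         start = end
--     return res
-- ===== Notes on version B (the rewrite author's own statement) =====
-- stated objective: alternative
-- what changed: B replaces A's single stateful scan with its pre_index guard by run-length grouping: it splits the array into maximal runs of equal values and emits the closed-form index sequence start+2, start+4, ... (floor((L-1)/2) entries) per run.
import Mathlib
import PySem

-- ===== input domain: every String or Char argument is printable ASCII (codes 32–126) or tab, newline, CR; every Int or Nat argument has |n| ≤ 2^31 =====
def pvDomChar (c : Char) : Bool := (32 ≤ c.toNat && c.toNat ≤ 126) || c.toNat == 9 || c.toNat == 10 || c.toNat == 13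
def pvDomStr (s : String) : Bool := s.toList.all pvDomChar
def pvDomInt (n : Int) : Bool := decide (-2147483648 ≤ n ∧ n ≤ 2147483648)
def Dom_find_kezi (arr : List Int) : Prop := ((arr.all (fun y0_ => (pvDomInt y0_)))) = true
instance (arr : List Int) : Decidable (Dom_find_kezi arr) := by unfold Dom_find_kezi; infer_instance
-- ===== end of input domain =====

-- B replaces A's stateful pre_index scan with run-length grouping and a closed-form
-- emission of floor((L-1)/2) indices per run (objective: alternative decomposition, same cost).

-- ===== PORT A =====
-- loop body of A's 'for i in range(2, len(arr))', extracted as a named helper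
def stepA (arr : List Int) (st : List Int × Int) (i : Int) : List Int × Int :=
  if (PySem.List.pyGet? arr i == PySem.List.pyGet? arr (i - 1))
      && (PySem.List.pyGet? arr i == PySem.List.pyGet? arr (i - 2))
      && (st.2 + 1 != i)
  then (st.1 ++ [i], i)
  else st

def find_kezi (arr : List Int) : List Int :=
  ((PySem.List.pyRange 2 (arr.length : Int) 1).foldl (stepA arr) ([], 0)).1

-- ===== PORT B =====
-- one maximal run at a time: measure its length L (inner while of Source B = takeWhile),
-- emit start+2+2k for k < (L-1)/2, continue after the run
def altRuns (base : Nat) (l : List Int) : List Int :=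
  match l with
  | [] => []
  | x :: xs =>
    let L := (List.takeWhile (fun y => y == x) (x :: xs)).length
    (List.range ((L - 1) / 2)).map (fun k => ((base + 2 + 2 * k : Nat) : Int))
      ++ altRuns (base + L) (List.drop L (x :: xs))
termination_by l.length
decreasing_by
  simp only [List.takeWhile_cons, beq_self_eq_true, if_true, List.length_drop]
  simp

def find_kezi_alt (arr : List Int) : List Int := altRuns 0 arr

-- ===== PRECONDITION & SPEC =====
def Spec_find_kezi (arr : List Int) (out : List Int) : Prop := out = find_kezi_alt arr
instance (arr : List Int) (out : List Int) : Decidable (Spec_find_kezi arr out) := by unfold Spec_find_kezi; infer_instance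

-- ===== CLAIM (what is proved, stated in full; the proofs are below) =====
def Claim_equal_find_kezi : Prop := ∀ (arr : List Int), Dom_find_kezi arr → Spec_find_kezi arr (find_kezi arr)

-- ===== LEMMAS AND PROOFS =====

-- reference loop for A: lookback values a = arr[i-2], b = arr[i-1], current index i,
-- state (acc, pre) as in A, consuming the suffix arr[i:]
def ra : Int → Int → Nat → Int → List Int → List Int → List Int × Int
  | _, _, _, pre, acc, [] => (acc, pre)
  | a, b, i, pre, acc, c :: rest =>
    if c = b ∧ c = a ∧ pre + 1 ≠ (i : Int)
    then ra b c (i + 1) (i : Int) (acc ++ [(i : Int)]) rest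
    else ra b c (i + 1) pre acc rest

-- indices A appends while inside a run: i, i+2, i+4, … over m remaining run elements
def emitIn (i m : Nat) : List Int :=
  if m = 0 then [] else (i : Int) :: emitIn (i + 2) (m - 2)
termination_by m

-- pre_index value after consuming m in-run elements starting at index i
def preAfter (pre : Int) (i m : Nat) : Int :=
  if m = 0 then pre else ((i + 2 * ((m + 1) / 2) - 2 : Nat) : Int)

lemma emitIn_eq (i m : Nat) :
    emitIn i m = (List.range ((m + 1) / 2)).map (fun k => ((i + 2 * k : Nat) : Int)) := by
  induction i, m using emitIn.induct with
  | case1 i => simp [emitIn]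
  | case2 i m hm ih =>
    rw [emitIn, if_neg hm, ih]
    have h2 : (m + 1) / 2 = (m - 2 + 1) / 2 + 1 := by omega
    rw [h2, List.range_succ_eq_map, List.map_cons, List.map_map]
    refine congrArg₂ _ (by simp) (List.map_congr_left fun k _ => ?_)
    simp only [Function.comp_apply]
    exact congrArg _ (by omega)

-- A's behaviour strictly inside a run of value v (both lookbacks = v)
lemma ra_inrun (m : Nat) : ∀ (v : Int) (rest : List Int) (i : Nat) (pre : Int) (acc : List Int),
    pre + 1 < (i : Int) →
    ra v v i pre acc (List.replicate m v ++ rest)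
      = ra v v (i + m) (preAfter pre i m) (acc ++ emitIn i m) rest := by
  induction m using Nat.strong_induction_on with
  | _ m ih =>
    intro v rest i pre acc hpre
    match m with
    | 0 => simp [preAfter, emitIn]
    | 1 =>
      rw [List.replicate_one, List.cons_append, List.nil_append, ra,
        if_pos ⟨rfl, rfl, by omega⟩]
      simp [preAfter, emitIn]
    | (k + 2) =>
      rw [show k + 2 = (k + 1) + 1 from rfl, List.replicate_succ, List.cons_append, ra,
        if_pos ⟨rfl, rfl, by omega⟩, List.replicate_succ, List.cons_append, ra,
        if_neg (by push_cast; simp)]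
      rw [ih k (by omega) v rest (i + 2) (i : Int) (acc ++ [(i : Int)]) (by push_cast; omega)]
      have h1 : i + 2 + k = i + (k + 2) := by omega
      have h2 : preAfter (i : Int) (i + 2) k = preAfter pre i (k + 2) := by
        unfold preAfter
        rcases Nat.eq_zero_or_pos k with hk | hk
        · subst hk
          rw [if_pos rfl, if_neg (by omega)]
          exact congrArg _ (by omega)
        · rw [if_neg (by omega), if_neg (by omega)]
          exact congrArg _ (by omega)
      have h3 : acc ++ [(i : Int)] ++ emitIn (i + 2) k = acc ++ emitIn i (k + 2) := by
        conv_rhs => rw [emitIn, if_neg (by omega)]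
        simp
      rw [h1, h2, h3]

lemma head?_dropWhile_false {p : Int → Bool} {l : List Int} {c : Int}
    (h : (l.dropWhile p).head? = some c) : p c = false := by
  induction l with
  | nil => simp at h
  | cons x xs ih =>
    rw [List.dropWhile_cons] at h
    by_cases hx : p x
    · simp [hx] at h; exact ih h
    · simp [hx] at h; subst h; simpa using hx

lemma takeWhile_eq_replicate (l : List Int) (v : Int) :
    List.takeWhile (fun c => c == v) l
      = List.replicate (List.takeWhile (fun c => c == v) l).length v := by
  apply List.eq_replicate_of_mem
  intro b hb
  simpa using List.mem_takeWhile_imp hb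

lemma takeWhile_replicate_append (v : Int) (rest : List Int)
    (hrest : ∀ c, rest.head? = some c → c ≠ v) (m : Nat) :
    List.takeWhile (fun y => y == v) (List.replicate m v ++ rest) = List.replicate m v := by
  induction m with
  | zero =>
    simp only [List.replicate_zero, List.nil_append]
    cases hr : rest with
    | nil => simp
    | cons c cs =>
      have hc : c ≠ v := hrest c (by simp [hr])
      simp [hc]
  | succ n ihn =>
    simp [List.replicate_succ, ihn]

-- unfold one whole run in altRuns
lemma altRuns_run (base m : Nat) (v : Int) (rest : List Int)
    (hrest : ∀ c, rest.head? = some c → c ≠ v) :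
    altRuns base (List.replicate (m + 1) v ++ rest)
      = (List.range (m / 2)).map (fun k => ((base + 2 + 2 * k : Nat) : Int))
          ++ altRuns (base + (m + 1)) rest := by
  have htw := takeWhile_replicate_append v rest hrest (m + 1)
  have hdr : List.drop (m + 1) (List.replicate (m + 1) v ++ rest) = rest := by
    rw [List.drop_append_of_le_length (by simp)]
    simp
  conv_lhs => rw [show List.replicate (m + 1) v ++ rest
      = v :: (List.replicate m v ++ rest) by rw [List.replicate_succ, List.cons_append]]
  rw [altRuns]
  simp only [← List.cons_append, ← List.replicate_succ, htw, List.length_replicate, hdr]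
  have h : (m + 1 - 1) / 2 = m / 2 := by omega
  rw [h]

-- A's behaviour from a run boundary (second lookback b differs from the head)
lemma ra_boundary (n : Nat) : ∀ (l : List Int), l.length ≤ n →
    ∀ (a b : Int) (i : Nat) (pre : Int) (acc : List Int),
    (∀ c, l.head? = some c → b ≠ c) → pre < (i : Int) →
    (ra a b i pre acc l).1 = acc ++ altRuns i l := by
  induction n with
  | zero =>
    intro l hl a b i pre acc _ _
    have hnil : l = [] := List.length_eq_zero_iff.mp (by omega)
    subst hnil
    simp [ra, altRuns]
  | succ n ih =>
    intro l hl a b i pre acc hb hpre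
    cases l with
    | nil => simp [ra, altRuns]
    | cons v l' =>
      have hbv : b ≠ v := hb v rfl
      obtain ⟨m, rest, hdecomp, hresthead⟩ :
          ∃ m rest, l' = List.replicate m v ++ rest ∧
            (∀ c, rest.head? = some c → c ≠ v) := by
        refine ⟨(l'.takeWhile (fun c => c == v)).length, l'.dropWhile (fun c => c == v),
          ?_, ?_⟩
        · conv_lhs => rw [← List.takeWhile_append_dropWhile (p := fun c => c == v) (l := l')]
          rw [← takeWhile_eq_replicate]
        · intro c hc
          simpa using head?_dropWhile_false hc
      have hlrest : rest.length ≤ n := by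
        have := congrArg List.length hdecomp
        simp only [List.length_cons, List.length_append, List.length_replicate] at this hl
        omega
      rw [ra, if_neg (by rintro ⟨h1, -, -⟩; exact hbv h1.symm)]
      cases m with
      | zero =>
        have hl' : l' = rest := by simpa using hdecomp
        rw [ih l' (by simp only [List.length_cons] at hl; omega) b v (i + 1) pre acc
          (fun c hc => Ne.symm (hresthead c (hl' ▸ hc))) (by push_cast; omega)]
        have hform : v :: l' = List.replicate (0 + 1) v ++ rest := by simp [hl']
        rw [hform, altRuns_run i 0 v rest hresthead]
        simp [hl']
      | succ k =>
        have hl' : l' = v :: (List.replicate k v ++ rest) := by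
          simp [hdecomp, List.replicate_succ]
        rw [hl', ra, if_neg (by rintro ⟨-, h2, -⟩; exact hbv h2.symm)]
        rw [ra_inrun k v rest (i + 2) pre acc (by push_cast; omega)]
        rw [ih rest hlrest v v (i + 2 + k) _ _ (fun c hc => Ne.symm (hresthead c hc))
          (by unfold preAfter; split <;> push_cast <;> omega)]
        have hcons : v :: v :: (List.replicate k v ++ rest)
            = List.replicate (k + 1 + 1) v ++ rest := by
          simp [List.replicate_succ]
        rw [hcons, altRuns_run i (k + 1) v rest hresthead, emitIn_eq]
        have hidx : i + (k + 1 + 1) = i + 2 + k := by omega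
        rw [hidx]
        simp [List.append_assoc]

-- the pyRange fold of A is the reference loop ra on the suffix arr[k+2:]
lemma bridge (arr : List Int) (d : Nat) : ∀ (k : Nat), arr.length ≤ k + 2 + d →
    ∀ (pre : Int) (acc : List Int) (a b : Int),
    arr[k]? = some a → arr[k + 1]? = some b →
    (PySem.List.pyRange ((k + 2 : Nat) : Int) (arr.length : Int) 1).foldl (stepA arr) (acc, pre)
      = ra a b (k + 2) pre acc (arr.drop (k + 2)) := by
  induction d with
  | zero =>
    intro k hk pre acc a b _ _
    rw [PySem.List.pyRange_one_eq_nil (by push_cast; omega),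
      List.drop_eq_nil_of_le (by omega)]
    simp [ra]
  | succ d ihd =>
    intro k hk pre acc a b ha hb
    by_cases hlen : arr.length ≤ k + 2
    · rw [PySem.List.pyRange_one_eq_nil (by push_cast; omega),
        List.drop_eq_nil_of_le (by omega)]
      simp [ra]
    · have hk2 : k + 2 < arr.length := by omega
      have hc : arr[k + 2]? = some arr[k + 2] := List.getElem?_eq_getElem hk2
      rw [PySem.List.pyRange_one_cons (by push_cast; omega), List.foldl_cons,
        List.drop_eq_getElem_cons hk2, ra]
      have hstep : stepA arr (acc, pre) ((k + 2 : Nat) : Int)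
          = if arr[k + 2] = b ∧ arr[k + 2] = a ∧ pre + 1 ≠ ((k + 2 : Nat) : Int)
            then (acc ++ [((k + 2 : Nat) : Int)], ((k + 2 : Nat) : Int)) else (acc, pre) := by
        unfold stepA
        have e1 : ((k + 2 : Nat) : Int) - 1 = ((k + 1 : Nat) : Int) := by push_cast; ring
        have e2 : ((k + 2 : Nat) : Int) - 2 = ((k : Nat) : Int) := by push_cast; ring
        rw [e1, e2]
        simp only [PySem.List.pyGet?_natCast, ha, hb, hc]
        by_cases h1 : arr[k + 2] = b <;> by_cases h2 : arr[k + 2] = a <;>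
          by_cases h3 : pre + 1 = ((k + 2 : Nat) : Int) <;>
          simp [h1, h2, h3, bne]
      rw [hstep]
      by_cases hcond : arr[k + 2] = b ∧ arr[k + 2] = a ∧ pre + 1 ≠ ((k + 2 : Nat) : Int)
      · rw [if_pos hcond, if_pos ⟨hcond.1, hcond.2.1, by push_cast at hcond ⊢; omega⟩]
        have := ihd (k + 1) (by omega) ((k + 2 : Nat) : Int) (acc ++ [((k + 2 : Nat) : Int)])
          b arr[k + 2] hb hc
        rw [show ((k + 2 : Nat) : Int) + 1 = ((k + 1 + 2 : Nat) : Int) by push_cast; ring]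
        rw [show (k + 2) + 1 = (k + 1) + 2 from rfl]
        simpa using this
      · rw [if_neg hcond, if_neg (by intro h; exact hcond ⟨h.1, h.2.1, by push_cast at h ⊢; omega⟩)]
        have := ihd (k + 1) (by omega) pre acc b arr[k + 2] hb hc
        rw [show ((k + 2 : Nat) : Int) + 1 = ((k + 1 + 2 : Nat) : Int) by push_cast; ring]
        rw [show (k + 2) + 1 = (k + 1) + 2 from rfl]
        simpa using this

-- ===== VERDICT (by name: the statement is the Claim_ definition above) =====
theorem find_kezi_spec : Claim_equal_find_kezi := by
  unfold Claim_equal_find_kezi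
  intro arr _
  unfold Spec_find_kezi
  match arr with
  | [] =>
    unfold find_kezi find_kezi_alt
    rw [altRuns, PySem.List.pyRange_one_eq_nil (by simp)]
    rfl
  | [x] =>
    show (((PySem.List.pyRange 2 ((1 : Nat) : Int) 1).foldl (stepA [x]) ([], 0)).1 : List Int) = _
    rw [PySem.List.pyRange_one_eq_nil (by norm_num)]
    show ([] : List Int) = find_kezi_alt [x]
    unfold find_kezi_alt
    rw [altRuns]
    simp [altRuns]
  | x :: y :: t =>
    obtain ⟨m, rest, hdecomp, hresthead⟩ :
        ∃ m rest, t = List.replicate m y ++ rest ∧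
          (∀ c, rest.head? = some c → c ≠ y) := by
      refine ⟨(t.takeWhile (fun c => c == y)).length, t.dropWhile (fun c => c == y), ?_, ?_⟩
      · conv_lhs => rw [← List.takeWhile_append_dropWhile (p := fun c => c == y) (l := t)]
        rw [← takeWhile_eq_replicate]
      · intro c hc
        simpa using head?_dropWhile_false hc
    have hbr := bridge (x :: y :: t) t.length 0 (by simp only [List.length_cons]; omega)
      0 [] x y rfl rfl
    have hfk : find_kezi (x :: y :: t) = (ra x y 2 0 [] t).1 := by
      unfold find_kezi
      rw [show (2 : Int) = ((0 + 2 : Nat) : Int) by norm_num, hbr]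
      rfl
    rw [hfk]
    by_cases hxy : x = y
    · subst hxy
      rw [hdecomp, ra_inrun m x rest 2 0 [] (by norm_num)]
      rw [ra_boundary rest.length rest le_rfl x x (2 + m) _ _
        (fun c hc => Ne.symm (hresthead c hc))
        (by unfold preAfter; split <;> push_cast <;> omega)]
      unfold find_kezi_alt
      have hcons : x :: x :: (List.replicate m x ++ rest)
          = List.replicate (m + 1 + 1) x ++ rest := by
        simp [List.replicate_succ]
      rw [hcons, altRuns_run 0 (m + 1) x rest hresthead, emitIn_eq]
      have hidx : 0 + (m + 1 + 1) = 2 + m := by omega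
      rw [hidx]
      simp
    · cases m with
      | zero =>
        have ht : t = rest := by simpa using hdecomp
        rw [ra_boundary t.length t le_rfl x y 2 0 []
          (fun c hc => Ne.symm (hresthead c (ht ▸ hc))) (by norm_num)]
        unfold find_kezi_alt
        have h1 : x :: y :: t = List.replicate (0 + 1) x ++ (y :: t) := by simp
        rw [h1, altRuns_run 0 0 x (y :: t)
          (fun c hc => by simp only [List.head?_cons, Option.some.injEq] at hc
                          exact hc ▸ Ne.symm hxy)]
        have h2 : y :: t = List.replicate (0 + 1) y ++ rest := by simp [ht]
        rw [h2, altRuns_run 1 0 y rest hresthead]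
        simp [ht]
      | succ k =>
        rw [hdecomp, List.replicate_succ, List.cons_append, ra,
          if_neg (by rintro ⟨-, h2, -⟩; exact hxy h2.symm)]
        rw [ra_inrun k y rest 3 0 [] (by norm_num)]
        rw [ra_boundary rest.length rest le_rfl y y (3 + k) _ _
          (fun c hc => Ne.symm (hresthead c hc))
          (by unfold preAfter; split <;> push_cast <;> omega)]
        unfold find_kezi_alt
        have h1 : x :: y :: (y :: (List.replicate k y ++ rest))
            = List.replicate (0 + 1) x ++ (y :: y :: (List.replicate k y ++ rest)) := by simp
        rw [h1, altRuns_run 0 0 x _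
          (fun c hc => by simp only [List.head?_cons, Option.some.injEq] at hc
                          exact hc ▸ Ne.symm hxy)]
        have h2 : y :: y :: (List.replicate k y ++ rest)
            = List.replicate (k + 1 + 1) y ++ rest := by
          simp [List.replicate_succ]
        rw [h2, altRuns_run 1 (k + 1) y rest hresthead, emitIn_eq]
        have hidx : 1 + (k + 1 + 1) = 3 + k := by omega
        rw [hidx]
        simp
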